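-- pv_equiv track=rewrite | github.com/DeXtroTip/advent-of-code | python/utils/algorithms.py | dgrid_coord_ranges
-- ===== SOURCE A (Python) =====
-- def dgrid_coord_ranges(dg):
--   if not dg:
--     return ()
--   mins = []
--   maxs = []
--   for i in range(len(next(iter(dg.keys())))):
--     mins.append(int(min(dg.keys(), key=lambda p: p[i])[i]))
--     maxs.append(int(max(dg.keys(), key=lambda p: p[i])[i]))
--   return tuple(mins), tuple(maxs)
-- ===== SOURCE B (Python) =====
-- def dgrid_coord_ranges(dg):
--   if not dg:
--     return ()
--   it = iter(dg)
--   first = next(it)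
--   mins = list(first)
--   maxs = list(first)
--   for p in it:
--     for i in range(len(mins)):
--       mins[i] = min(mins[i], p[i])
--       maxs[i] = max(maxs[i], p[i])
--   return tuple(int(m) for m in mins), tuple(int(m) for m in maxs)
-- ===== Notes on version B (the rewrite author's own statement) =====
-- stated objective: simpler
-- what changed: Replaces A's 2*D separate min/max scans (each a full pass with a key function) by one single pass over the keys maintaining running per-dimension minima and maxima.
-- outside the precondition, e.g. on dgrid_coord_ranges({}): A returns (), B returns ()
import Mathlib
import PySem

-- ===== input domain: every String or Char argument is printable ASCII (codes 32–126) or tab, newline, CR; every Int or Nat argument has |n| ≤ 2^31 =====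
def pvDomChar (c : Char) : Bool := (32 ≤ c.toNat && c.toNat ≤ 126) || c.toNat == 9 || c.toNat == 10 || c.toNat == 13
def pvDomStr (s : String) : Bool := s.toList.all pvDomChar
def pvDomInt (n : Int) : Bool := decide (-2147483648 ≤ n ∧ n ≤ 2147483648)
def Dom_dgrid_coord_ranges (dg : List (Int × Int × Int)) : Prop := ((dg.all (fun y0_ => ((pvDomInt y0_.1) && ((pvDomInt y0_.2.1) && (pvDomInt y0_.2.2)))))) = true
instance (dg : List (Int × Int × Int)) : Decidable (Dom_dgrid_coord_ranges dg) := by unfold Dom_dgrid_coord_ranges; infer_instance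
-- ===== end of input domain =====

-- B replaces A's 2*D separate min/max scans over the keys by one single pass
-- keeping running per-dimension minima and maxima (objective: simpler).

-- ===== PORT A =====
-- Python's min(..., key=f): scan keeping the current best, replace on strictly smaller key.
def pyMinBy (f : Int × Int → Int) (h : Int × Int) (t : List (Int × Int)) : Int × Int :=
  t.foldl (fun b x => if f x < f b then x else b) h

-- Python's max(..., key=f): replace on strictly greater key (first maximal kept).
def pyMaxBy (f : Int × Int → Int) (h : Int × Int) (t : List (Int × Int)) : Int × Int :=
  t.foldl (fun b x => if f b < f x then x else b) h

-- A: dg is a dict keyed by 2-tuples; an element (a, b, v) stands for key (a, b) with value v.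
-- On the typed domain the keys are pairs, so range(len(first key)) = [0, 1]; the two loop
-- iterations are written out with .1/.2 projections (int() on an int is the identity).
-- Empty dict: Python A returns the atypical (), excluded by Pre_; the port returns ([], []).
def dgrid_coord_ranges (dg : List (Int × Int × Int)) : List Int × List Int :=
  match dg.map (fun y => (y.1, y.2.1)) with
  | [] => ([], [])
  | h :: t =>
    let mins : List Int := [(pyMinBy (fun p => p.1) h t).1, (pyMinBy (fun p => p.2) h t).2]
    let maxs : List Int := [(pyMaxBy (fun p => p.1) h t).1, (pyMaxBy (fun p => p.2) h t).2]
    (mins, maxs)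

-- ===== PORT B =====
-- B: one pass over the remaining keys, state = (min1, min2, max1, max2) seeded from the first key.
def dgrid_coord_ranges_alt (dg : List (Int × Int × Int)) : List Int × List Int :=
  match dg with
  | [] => ([], [])
  | y :: t =>
    let s := t.foldl
      (fun (s : Int × Int × Int × Int) z =>
        (min s.1 z.1, min s.2.1 z.2.1, max s.2.2.1 z.1, max s.2.2.2 z.2.1))
      (y.1, y.2.1, y.1, y.2.1)
    ([s.1, s.2.1], [s.2.2.1, s.2.2.2])

-- ===== PRECONDITION & SPEC =====
-- Pre_ excludes only the empty dict, on which A returns the bare tuple (), not a value of the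
-- declared pair-of-tuples type.
def Pre_dgrid_coord_ranges (dg : List (Int × Int × Int)) : Prop := dg ≠ []
instance (dg : List (Int × Int × Int)) : Decidable (Pre_dgrid_coord_ranges dg) := by
  unfold Pre_dgrid_coord_ranges; infer_instance

def pvWitness_dgrid_coord_ranges : (List (Int × Int × Int)) := [(1, 2, 5), (0, 7, 3)]

def Spec_dgrid_coord_ranges (dg : List (Int × Int × Int)) (out : List Int × List Int) : Prop := out = dgrid_coord_ranges_alt dg
instance (dg : List (Int × Int × Int)) (out : List Int × List Int) : Decidable (Spec_dgrid_coord_ranges dg out) := by unfold Spec_dgrid_coord_ranges; infer_instance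

-- ===== CLAIM (what is proved, stated in full; the proofs are below) =====
def Claim_equal_dgrid_coord_ranges : Prop := ∀ (dg : List (Int × Int × Int)), Dom_dgrid_coord_ranges dg → Pre_dgrid_coord_ranges dg → Spec_dgrid_coord_ranges dg (dgrid_coord_ranges dg)

-- ===== LEMMAS AND PROOFS =====

-- The f-value of Python's min-by fold is the fold of binary min over the f-values.
theorem pyMinBy_val (f : Int × Int → Int) (t : List (Int × Int)) (h : Int × Int) :
    f (pyMinBy f h t) = t.foldl (fun m x => min m (f x)) (f h) := by
  induction t generalizing h with
  | nil => rfl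
  | cons x xs ih =>
    simp only [pyMinBy, List.foldl_cons] at *
    rw [ih]
    congr 1
    split_ifs with hx <;> omega

theorem pyMaxBy_val (f : Int × Int → Int) (t : List (Int × Int)) (h : Int × Int) :
    f (pyMaxBy f h t) = t.foldl (fun m x => max m (f x)) (f h) := by
  induction t generalizing h with
  | nil => rfl
  | cons x xs ih =>
    simp only [pyMaxBy, List.foldl_cons] at *
    rw [ih]
    congr 1
    split_ifs with hx <;> omega

-- B's single fold over the quadruple state splits into four independent scalar folds.
theorem fold4_split (t : List (Int × Int × Int)) (a b c d : Int) :
    t.foldl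
      (fun (s : Int × Int × Int × Int) z =>
        (min s.1 z.1, min s.2.1 z.2.1, max s.2.2.1 z.1, max s.2.2.2 z.2.1))
      (a, b, c, d)
    = (t.foldl (fun m z => min m z.1) a,
       t.foldl (fun m z => min m z.2.1) b,
       t.foldl (fun m z => max m z.1) c,
       t.foldl (fun m z => max m z.2.1) d) := by
  induction t generalizing a b c d with
  | nil => rfl
  | cons z zs ih => simp only [List.foldl_cons, ih]

-- ===== VERDICT (by name: the statement is the Claim_ definition above) =====
theorem dgrid_coord_ranges_spec : Claim_equal_dgrid_coord_ranges := by
  intro dg _ hpre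
  unfold Spec_dgrid_coord_ranges
  match dg with
  | [] => exact absurd rfl hpre
  | y :: t =>
    simp only [dgrid_coord_ranges, dgrid_coord_ranges_alt, List.map_cons, fold4_split]
    have h1 := pyMinBy_val (fun p => p.1) (t.map (fun y => (y.1, y.2.1))) (y.1, y.2.1)
    have h2 := pyMinBy_val (fun p => p.2) (t.map (fun y => (y.1, y.2.1))) (y.1, y.2.1)
    have h3 := pyMaxBy_val (fun p => p.1) (t.map (fun y => (y.1, y.2.1))) (y.1, y.2.1)
    have h4 := pyMaxBy_val (fun p => p.2) (t.map (fun y => (y.1, y.2.1))) (y.1, y.2.1)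
    simp only [List.foldl_map] at h1 h2 h3 h4
    simp [h1, h2, h3, h4]
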